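-- pv_equiv track=rewrite | github.com/cheniison/Experiment | AI/wordSegment/wordSeg.py | exact_correct_words
-- ===== SOURCE A (Python) =====
-- def exact_correct_words(line_src, line_ans):
--     """
--     Exact correct evaluate function
--     :param line_src: the line to be calculated
--     :param line_ans: the line to be contrasted
--     :return: correct words in line1
--     """
--     len_src = 0
--     len_ans = 0
--     i = 0
--     j = 0
--     res = []
--
--     while i < len(line_src) and j < len(line_ans):
--         if len_src < len_ans:
--             len_src = len_src + len(line_src[i])
--             i = i + 1
--         elif len_src > len_ans:
--             len_ans = len_ans + len(line_ans[j])
--             j = j + 1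
--         else:
--             if line_src[i] == line_ans[j]:
--                 res.append(line_src[i])
--             len_src = len_src + len(line_src[i])
--             len_ans = len_ans + len(line_ans[j])
--             i = i + 1
--             j = j + 1
--     return res
-- ===== SOURCE B (Python) =====
-- def exact_correct_words(line_src, line_ans):
--     starts = {}
--     off = 0
--     for w in line_src:
--         starts.setdefault(off, []).append(w)
--         off += len(w)
--     res = []
--     off = 0
--     for w in line_ans:
--         bucket = starts.get(off)
--         if bucket and bucket.pop(0) == w:
--             res.append(w)
--         off += len(w)
--     return res
-- ===== Notes on version B (the rewrite author's own statement) =====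
-- stated objective: alternative
-- what changed: Replaces the synchronized two-pointer offset merge with two independent passes: a dict mapping each start offset to the queue of source words starting there, then a scan of line_ans that pops one queued word per offset query and keeps it on equality.
import Mathlib
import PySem

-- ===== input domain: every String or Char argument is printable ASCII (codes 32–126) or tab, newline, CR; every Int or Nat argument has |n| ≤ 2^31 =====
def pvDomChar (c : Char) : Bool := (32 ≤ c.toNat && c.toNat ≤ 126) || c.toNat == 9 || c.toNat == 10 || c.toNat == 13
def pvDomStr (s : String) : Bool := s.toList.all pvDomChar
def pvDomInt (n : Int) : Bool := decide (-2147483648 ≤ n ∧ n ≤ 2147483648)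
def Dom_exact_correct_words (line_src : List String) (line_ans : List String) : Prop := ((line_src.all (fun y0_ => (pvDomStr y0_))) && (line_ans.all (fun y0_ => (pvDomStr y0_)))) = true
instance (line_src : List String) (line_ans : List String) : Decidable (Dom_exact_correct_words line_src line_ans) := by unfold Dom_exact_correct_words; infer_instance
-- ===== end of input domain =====

-- B replaces A's synchronized two-pointer offset merge by two independent passes
-- (a start-offset → queue-of-words dict over line_src, then a pop-and-compare scan
-- over line_ans); same cost, different decomposition ("alternative").

-- ===== PORT A =====
-- A's while loop over indices i, j with running offsets len_src, len_ans,
-- transliterated as recursion consuming the two lists.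
def pvGoA : List String → List String → Int → Int → List String
  | s :: ss, a :: as, len_src, len_ans =>
    if len_src < len_ans then
      pvGoA ss (a :: as) (len_src + PySem.Str.len s) len_ans
    else if len_ans < len_src then
      pvGoA (s :: ss) as len_src (len_ans + PySem.Str.len a)
    else if s = a then
      s :: pvGoA ss as (len_src + PySem.Str.len s) (len_ans + PySem.Str.len a)
    else
      pvGoA ss as (len_src + PySem.Str.len s) (len_ans + PySem.Str.len a)
  | _, _, _, _ => []
  termination_by ss as _ _ => ss.length + as.length

def exact_correct_words (line_src : List String) (line_ans : List String) : List String :=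
  pvGoA line_src line_ans 0 0

-- ===== PORT B =====
-- first pass: starts.setdefault(off, []).append(w)  ≡  starts[off] = starts.get(off, []) + [w]
def pvBuildStep (p : PySem.Dict Int (List String) × Int) (w : String) :
    PySem.Dict Int (List String) × Int :=
  (p.1.modify p.2 [] (· ++ [w]), p.2 + PySem.Str.len w)

-- second pass: bucket = starts.get(off); if bucket and bucket.pop(0) == w: res.append(w)
-- (bucket.pop(0) mutates the stored list: re-insert the tail at the same key)
def pvScanStep (st : List String × Int × PySem.Dict Int (List String)) (w : String) :
    List String × Int × PySem.Dict Int (List String) :=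
  match st.2.2.get? st.2.1 with
  | some (v :: rest) =>
      ((if v = w then st.1 ++ [w] else st.1), st.2.1 + PySem.Str.len w, st.2.2.insert st.2.1 rest)
  | _ => (st.1, st.2.1 + PySem.Str.len w, st.2.2)

def exact_correct_words_alt (line_src : List String) (line_ans : List String) : List String :=
  let starts := (line_src.foldl pvBuildStep (PySem.Dict.empty, 0)).1
  (line_ans.foldl pvScanStep ([], 0, starts)).1

-- ===== PRECONDITION & SPEC =====
def Spec_exact_correct_words (line_src : List String) (line_ans : List String) (out : List String) : Prop := out = exact_correct_words_alt line_src line_ans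
instance (line_src : List String) (line_ans : List String) (out : List String) : Decidable (Spec_exact_correct_words line_src line_ans out) := by unfold Spec_exact_correct_words; infer_instance

-- ===== CLAIM (what is proved, stated in full; the proofs are below) =====
def Claim_equal_exact_correct_words : Prop := ∀ (line_src : List String) (line_ans : List String), Dom_exact_correct_words line_src line_ans → Spec_exact_correct_words line_src line_ans (exact_correct_words line_src line_ans)

-- ===== LEMMAS AND PROOFS =====

-- Both sides reduce to the same reference: annotate each list with start offsets and
-- merge the two annotated lists by offset.
def pvAnnot (o : Int) : List String → List (Int × String)
  | [] => []
  | w :: ws => (o, w) :: pvAnnot (o + PySem.Str.len w) ws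

def pvM : List (Int × String) → List (Int × String) → List String
  | (k, v) :: S, (o, w) :: T =>
    if k < o then pvM S ((o, w) :: T)
    else if o < k then pvM ((k, v) :: S) T
    else (if v = w then [w] else []) ++ pvM S T
  | _, _ => []
  termination_by S T => S.length + T.length

theorem pv_len_nonneg (s : String) : 0 ≤ PySem.Str.len s := by
  simp [PySem.Str.len_eq]

theorem pvM_nil_left (T : List (Int × String)) : pvM [] T = [] := by
  rw [pvM]; simp

theorem pvM_nil_right (S : List (Int × String)) : pvM S [] = [] := by
  rw [pvM]; simp

theorem pvAnnot_key_ge (ss : List String) (b : Int) (p : Int × String) (h : p ∈ pvAnnot b ss) :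
    b ≤ p.1 := by
  induction ss generalizing b with
  | nil => simp [pvAnnot] at h
  | cons s ss ih =>
    simp only [pvAnnot, List.mem_cons] at h
    rcases h with h | h
    · simp [h]
    · have := ih _ h; have := pv_len_nonneg s; omega

theorem pvAnnot_pairwise (ws : List String) (o : Int) :
    (pvAnnot o ws).Pairwise (fun p q => p.1 ≤ q.1) := by
  induction ws generalizing o with
  | nil => simp [pvAnnot]
  | cons w ws ih =>
    refine List.Pairwise.cons ?_ (ih _)
    intro x hx
    have := pvAnnot_key_ge ws _ x hx
    have := pv_len_nonneg w
    omega

-- A's merge equals the reference on the annotated lists.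
theorem pvGoA_eq_pvM (n : Nat) (ss as : List String) (ls la : Int)
    (hn : ss.length + as.length ≤ n) :
    pvGoA ss as ls la = pvM (pvAnnot ls ss) (pvAnnot la as) := by
  induction n generalizing ss as ls la with
  | zero =>
    have h1 : ss = [] := by cases ss <;> simp_all
    have h2 : as = [] := by cases as <;> simp_all
    subst h1; subst h2
    rw [pvGoA] <;> simp [pvAnnot, pvM_nil_left]
  | succ n ih =>
    cases as with
    | nil => cases ss <;> (rw [pvGoA] <;> simp [pvAnnot, pvM_nil_right])
    | cons a as =>
      cases ss with
      | nil => rw [pvGoA] <;> simp [pvAnnot, pvM_nil_left]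
      | cons s ss =>
        rw [pvGoA]
        show _ = pvM ((ls, s) :: pvAnnot (ls + PySem.Str.len s) ss)
                    ((la, a) :: pvAnnot (la + PySem.Str.len a) as)
        rw [pvM]
        simp only [List.length_cons] at hn
        have hn1 : ss.length + (a :: as).length ≤ n := by simp only [List.length_cons]; omega
        have hn2 : ss.length + as.length ≤ n := by omega
        have hn3 : (s :: ss).length + as.length ≤ n := by simp only [List.length_cons]; omega
        rcases lt_trichotomy ls la with h | h | h
        · rw [if_pos h, if_pos h, ih ss (a :: as) (ls + PySem.Str.len s) la hn1]
          rfl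
        · subst h
          rw [if_neg (lt_irrefl ls), if_neg (lt_irrefl ls), if_neg (lt_irrefl ls),
            if_neg (lt_irrefl ls), ih ss as (ls + PySem.Str.len s) (ls + PySem.Str.len a) hn2]
          by_cases hsa : s = a
          · rw [if_pos hsa, if_pos hsa]; subst hsa; rfl
          · rw [if_neg hsa, if_neg hsa]; rfl
        · have hnl : ¬ ls < la := by omega
          rw [if_neg hnl, if_pos h, if_neg hnl, if_pos h,
            ih (s :: ss) as ls (la + PySem.Str.len a) hn3]
          rfl

-- entries dropped by dropWhile (·.1 < o) start strictly below o, so filtering at q ≥ o ignores them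
theorem pv_filter_dropWhile (U : List (Int × String)) (o q : Int) (h : o ≤ q) :
    U.filter (fun p => p.1 == q) = (U.dropWhile (fun p => decide (p.1 < o))).filter (fun p => p.1 == q) := by
  induction U with
  | nil => rfl
  | cons p U ih =>
    by_cases hp : p.1 < o
    · rw [List.dropWhile_cons_of_pos (by simpa using hp), List.filter_cons_of_neg (by simp; omega)]
      exact ih
    · rw [List.dropWhile_cons_of_neg (by simpa using hp)]

theorem pvM_dropWhile (U T : List (Int × String)) (o : Int) (w : String) :
    pvM U ((o, w) :: T) = pvM (U.dropWhile (fun p => decide (p.1 < o))) ((o, w) :: T) := by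
  induction U with
  | nil => rfl
  | cons p U ih =>
    obtain ⟨k, v⟩ := p
    by_cases hk : k < o
    · rw [List.dropWhile_cons_of_pos (by simpa using hk), pvM, if_pos hk]
      exact ih
    · rw [List.dropWhile_cons_of_neg (by simpa using hk)]

-- B's scan loop, against the reference merge.  U is the still-consultable suffix of the
-- annotated source list; the dict's buckets at offsets ≥ o agree with U.
theorem pv_scan_pvM (ws : List String) (res : List String) (o : Int)
    (d : PySem.Dict Int (List String)) (U : List (Int × String))
    (hU : U.Pairwise (fun p q => p.1 ≤ q.1))
    (hd : ∀ q : Int, o ≤ q → d.getD q [] = (U.filter (fun p => p.1 == q)).map (·.2)) :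
    (ws.foldl pvScanStep (res, o, d)).1 = res ++ pvM U (pvAnnot o ws) := by
  induction ws generalizing res o d U with
  | nil => simp [pvAnnot, pvM_nil_right]
  | cons w ws ih =>
    have hlen := pv_len_nonneg w
    set U' := U.dropWhile (fun p => decide (p.1 < o)) with hU'def
    have hUsub : U'.Pairwise (fun p q => p.1 ≤ q.1) :=
      List.Pairwise.sublist (List.dropWhile_sublist _) hU
    have hfilt : ∀ q : Int, o ≤ q →
        U.filter (fun p => p.1 == q) = U'.filter (fun p => p.1 == q) :=
      fun q hq => pv_filter_dropWhile U o q hq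
    have hbucket : d.getD o [] = (U'.filter (fun p => p.1 == o)).map (·.2) := by
      rw [hd o le_rfl, hfilt o le_rfl]
    have hMdrop : pvM U (pvAnnot o (w :: ws)) = pvM U' ((o, w) :: pvAnnot (o + PySem.Str.len w) ws) := by
      rw [show pvAnnot o (w :: ws) = (o, w) :: pvAnnot (o + PySem.Str.len w) ws from rfl]
      exact pvM_dropWhile U _ o w
    rw [List.foldl_cons, hMdrop]
    cases hU'c : U' with
    | nil =>
      -- no consultable source word at offset ≥ o starting exactly at o: bucket is empty
      have hb0 : d.getD o [] = [] := by rw [hbucket, hU'c]; rfl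
      have hstep : pvScanStep (res, o, d) w = (res, o + PySem.Str.len w, d) := by
        rcases hg : d.get? o with _ | b
        · simp [pvScanStep, hg]
        · have hb : d.getD o [] = b := by rw [PySem.Dict.getD_eq_get?_getD, hg]; rfl
          rw [hb0] at hb
          subst hb
          simp [pvScanStep, hg]
      rw [hstep, ih res (o + PySem.Str.len w) d U' hUsub ?_]
      · rw [hU'c, pvM_nil_left, pvM_nil_left]
      · intro q hq
        rw [hd q (by omega), hfilt q (by omega), hU'c]
    | cons p U'' =>
      obtain ⟨k, v⟩ := p
      have hko : o ≤ k := by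
        have := List.head?_dropWhile_not (fun p => decide (p.1 < o)) U
        rw [← hU'def, hU'c] at this
        simpa using this
      have hU''ge : ∀ x ∈ U'', k ≤ x.1 := by
        have := hU'c ▸ hUsub
        exact fun x hx => (List.pairwise_cons.1 this).1 x hx
      by_cases hk : k = o
      · -- head of U' starts exactly at o: the bucket is v followed by the rest at o
        subst hk
        have hbv : d.getD k [] = v :: (U''.filter (fun p => p.1 == k)).map (·.2) := by
          rw [hbucket, hU'c]; simp
        have hg : d.get? k = some (v :: (U''.filter (fun p => p.1 == k)).map (·.2)) := by
          rcases hg0 : d.get? k with _ | b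
          · have : d.getD k [] = [] := by rw [PySem.Dict.getD_eq_get?_getD, hg0]; rfl
            rw [hbv] at this; simp at this
          · have : d.getD k [] = b := by rw [PySem.Dict.getD_eq_get?_getD, hg0]; rfl
            rw [hbv] at this; rw [← this]
        have hstep : pvScanStep (res, k, d) w =
            ((if v = w then res ++ [w] else res), k + PySem.Str.len w,
              d.insert k ((U''.filter (fun p => p.1 == k)).map (·.2))) := by
          simp [pvScanStep, hg]
        rw [hstep, ih _ (k + PySem.Str.len w) _ U'' (List.pairwise_cons.1 (hU'c ▸ hUsub)).2 ?_]
        · rw [show pvM ((k, v) :: U'') ((k, w) :: pvAnnot (k + PySem.Str.len w) ws)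
              = (if v = w then [w] else []) ++ pvM U'' (pvAnnot (k + PySem.Str.len w) ws) from by
            rw [pvM, if_neg (by omega), if_neg (by omega)]]
          split <;> simp
        · intro q hq
          by_cases hqk : q = k
          · subst hqk
            rw [PySem.Dict.getD_insert_self]
          · rw [PySem.Dict.getD_insert_of_ne d _ _ hqk, hd q (by omega), hfilt q (by omega), hU'c,
              List.filter_cons_of_neg (by simp; omega)]
      · -- head of U' starts strictly after o: nothing consultable at o, bucket empty
        have hko' : o < k := by omega
        have hb0 : d.getD o [] = [] := by
          rw [hbucket, hU'c, List.filter_cons_of_neg (by simp; omega), List.filter_eq_nil_iff.2 ?_]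
          · rfl
          · intro x hx
            have := hU''ge x hx
            simp; omega
        have hstep : pvScanStep (res, o, d) w = (res, o + PySem.Str.len w, d) := by
          rcases hg : d.get? o with _ | b
          · simp [pvScanStep, hg]
          · have hb : d.getD o [] = b := by rw [PySem.Dict.getD_eq_get?_getD, hg]; rfl
            rw [hb0] at hb
            subst hb
            simp [pvScanStep, hg]
        rw [hstep, ih res (o + PySem.Str.len w) d U' hUsub ?_]
        · rw [hU'c, show pvM ((k, v) :: U'') ((o, w) :: pvAnnot (o + PySem.Str.len w) ws)
              = pvM ((k, v) :: U'') (pvAnnot (o + PySem.Str.len w) ws) from by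
            rw [pvM, if_neg (by omega), if_pos hko']]
        · intro q hq
          rw [hd q (by omega), hfilt q (by omega)]

-- the first pass over line_src is the bucket-building fold over the annotated list
theorem pv_build_eq (src : List String) (d : PySem.Dict Int (List String)) (o : Int) :
    (src.foldl pvBuildStep (d, o)).1
      = (pvAnnot o src).foldl (fun d p => d.modify p.1 [] (· ++ [p.2])) d := by
  induction src generalizing d o with
  | nil => rfl
  | cons w ws ih => simpa [pvAnnot, pvBuildStep] using ih (d.modify o [] (· ++ [w])) (o + PySem.Str.len w)

-- ===== VERDICT (by name: the statement is the Claim_ definition above) =====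
theorem exact_correct_words_spec : Claim_equal_exact_correct_words := by
  intro src ans _
  unfold Spec_exact_correct_words exact_correct_words exact_correct_words_alt
  rw [pvGoA_eq_pvM (src.length + ans.length) src ans 0 0 le_rfl]
  rw [pv_scan_pvM ans [] 0 _ (pvAnnot 0 src) (pvAnnot_pairwise src 0) ?_]
  · simp
  · intro q _
    rw [pv_build_eq src PySem.Dict.empty 0, PySem.Dict.getD_foldl_modify_append]
    simp
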